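-- pv_equiv track=rewrite | github.com/Dimaaap/Leetcode | Easy/3024.)Type of Triangle II.py | can_be_triangle
-- ===== SOURCE A (Python) =====
-- def can_be_triangle(sides: list[int]):
--     max_el = max(sides)
--     for i in range(len(sides)):
--         for j in range(i + 1, len(sides)):
--             cur_sum = sides[i] + sides[j]
--             if cur_sum <= max_el:
--                 return False
--     return True
-- ===== SOURCE B (Python) =====
-- def can_be_triangle(sides: list[int]):
--     if len(sides) < 2:
--         return True
--     ss = sorted(sides)
--     return ss[0] + ss[1] > ss[-1]
-- ===== Notes on version B (the rewrite author's own statement) =====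
-- stated objective: alternative
-- what changed: Replaces the nested all-pairs scan with a single sort followed by one comparison: the two smallest elements give the minimal pair sum and the last sorted element is the maximum, so ss[0]+ss[1] > ss[-1] decides the whole predicate.
-- outside the precondition, e.g. on can_be_triangle([]): A raises ValueError, B returns True
import Mathlib
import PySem

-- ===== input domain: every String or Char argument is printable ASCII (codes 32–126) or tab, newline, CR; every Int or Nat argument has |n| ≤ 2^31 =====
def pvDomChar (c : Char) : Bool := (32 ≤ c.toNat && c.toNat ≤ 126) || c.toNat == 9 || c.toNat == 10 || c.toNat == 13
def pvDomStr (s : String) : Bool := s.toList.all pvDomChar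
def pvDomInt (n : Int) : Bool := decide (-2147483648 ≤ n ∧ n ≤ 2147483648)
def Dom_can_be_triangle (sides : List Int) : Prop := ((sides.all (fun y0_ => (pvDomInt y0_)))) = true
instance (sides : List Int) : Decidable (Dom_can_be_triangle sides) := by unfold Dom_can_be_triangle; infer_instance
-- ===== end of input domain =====

-- B replaces A's nested all-pairs scan with sort-then-one-comparison (two smallest vs maximum); equal on all nonempty lists.


-- ===== PORT A =====
-- inner loop 'for j in range(i+1, len(sides))' with early return False;
-- sides.getD is exact here: both indices are in range on every iteration
def aLoopJ (sides : List Int) (maxEl : Int) (i j : Nat) : Bool :=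
  if _h : j < sides.length then
    if sides.getD i 0 + sides.getD j 0 ≤ maxEl then false
    else aLoopJ sides maxEl i (j + 1)
  else true
termination_by sides.length - j

-- outer loop 'for i in range(len(sides))'
def aLoopI (sides : List Int) (maxEl : Int) (i : Nat) : Bool :=
  if _h : i < sides.length then
    if aLoopJ sides maxEl i (i + 1) = false then false
    else aLoopI sides maxEl (i + 1)
  else true
termination_by sides.length - i

def can_be_triangle (sides : List Int) : Bool :=
  match PySem.List.max? sides (fun x => x) with
  | none => true      -- max([]) raises ValueError in Python; excluded by Pre_
  | some m => aLoopI sides m 0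

-- ===== PORT B =====
-- ss[-1] is ported as getD (length-1): ss is nonempty in this branch, so it is exact
def can_be_triangle_alt (sides : List Int) : Bool :=
  if sides.length < 2 then true
  else
    let ss := PySem.List.sorted sides (fun x => x) false
    decide (ss.getD (ss.length - 1) 0 < ss.getD 0 0 + ss.getD 1 0)

-- ===== PRECONDITION & SPEC =====
-- Pre_ excludes only the empty list, on which Python's max([]) raises ValueError
def Pre_can_be_triangle (sides : List Int) : Prop := sides ≠ []
instance (sides : List Int) : Decidable (Pre_can_be_triangle sides) := by unfold Pre_can_be_triangle; infer_instance
def pvWitness_can_be_triangle : List Int := [3, 4, 5]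

def Spec_can_be_triangle (sides : List Int) (out : Bool) : Prop := out = can_be_triangle_alt sides
instance (sides : List Int) (out : Bool) : Decidable (Spec_can_be_triangle sides out) := by unfold Spec_can_be_triangle; infer_instance

-- ===== CLAIM (what is proved, stated in full; the proofs are below) =====
def Claim_equal_can_be_triangle : Prop := ∀ (sides : List Int), Dom_can_be_triangle sides → Pre_can_be_triangle sides → Spec_can_be_triangle sides (can_be_triangle sides)

-- ===== LEMMAS AND PROOFS =====

theorem aLoopJ_true_iff (sides : List Int) (m : Int) (i j : Nat) :
    aLoopJ sides m i j = true ↔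
      ∀ k, j ≤ k → k < sides.length → m < sides.getD i 0 + sides.getD k 0 := by
  fun_induction aLoopJ sides m i j with
  | case1 j h hle =>
    simp only [Bool.false_eq_true, false_iff]
    push Not
    exact ⟨j, le_refl j, h, by omega⟩
  | case2 j h hle ih =>
    rw [ih]
    constructor
    · intro hall k hk hlt
      rcases Nat.eq_or_lt_of_le hk with rfl | hk'
      · omega
      · exact hall k hk' hlt
    · intro hall k hk hlt; exact hall k (by omega) hlt
  | case3 j h =>
    simp only [true_iff]
    intro k hk hlt; omega

theorem aLoopI_true_iff (sides : List Int) (m : Int) (i : Nat) :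
    aLoopI sides m i = true ↔
      ∀ p q, i ≤ p → p < q → q < sides.length →
        m < sides.getD p 0 + sides.getD q 0 := by
  fun_induction aLoopI sides m i with
  | case1 i h hfail =>
    simp only [Bool.false_eq_true, false_iff]
    intro hall
    rw [Bool.eq_false_iff, ne_eq, aLoopJ_true_iff] at hfail
    exact hfail (fun k hk hlt => hall i k (le_refl i) hk hlt)
  | case2 i h hok ih =>
    rw [ih]
    rw [Bool.eq_false_iff, ne_eq, not_not, aLoopJ_true_iff] at hok
    constructor
    · intro hall p q hp hpq hq
      rcases Nat.eq_or_lt_of_le hp with rfl | hp'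
      · exact hok q hpq hq
      · exact hall p q hp' hpq hq
    · intro hall p q hp hpq hq; exact hall p q (by omega) hpq hq
  | case3 i h =>
    simp only [true_iff]
    intro p q hp hpq hq; omega

-- ===== VERDICT (by name: the statement is the Claim_ definition above) =====
theorem can_be_triangle_spec : Claim_equal_can_be_triangle := by
  intro sides _ hpre
  unfold Spec_can_be_triangle can_be_triangle can_be_triangle_alt
  cases hmax : PySem.List.max? sides (fun x => x) with
  | none => exact absurd ((PySem.List.max?_eq_none_iff sides _).mp hmax) hpre
  | some m =>
    by_cases hlen : sides.length < 2
    · simp only [if_pos hlen]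
      rw [aLoopI_true_iff]
      intro p q hp hpq hq; omega
    · simp only [if_neg hlen]
      have hlss : (PySem.List.sorted sides (fun x => x) false).length = sides.length :=
        PySem.List.length_sorted sides _ false
      set ss := PySem.List.sorted sides (fun x => x) false with hssdef
      have hlast_lt : ss.length - 1 < ss.length := by omega
      have h0 : (0:Nat) < ss.length := by omega
      have h1 : (1:Nat) < ss.length := by omega
      have hmmem : m ∈ ss := (PySem.List.mem_sorted sides _ false m).mpr (PySem.List.max?_mem hmax)
      have hm_eq : ss[ss.length - 1]'hlast_lt = m := by
        apply le_antisymm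
        · exact PySem.List.max?_isMax hmax _
            ((PySem.List.mem_sorted sides _ false _).mp (List.getElem_mem hlast_lt))
        · obtain ⟨k, hk, hkeq⟩ := List.mem_iff_getElem.mp hmmem
          calc m = ss[k]'hk := hkeq.symm
            _ ≤ ss[ss.length - 1]'hlast_lt :=
              PySem.List.sorted_id_getElem_mono sides (by omega) hlast_lt
      rw [Bool.eq_iff_iff, aLoopI_true_iff, decide_eq_true_iff]
      rw [List.getD_eq_getElem ss 0 hlast_lt, List.getD_eq_getElem ss 0 h0,
        List.getD_eq_getElem ss 0 h1, hm_eq]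
      have hperm : ss.Perm sides := PySem.List.sorted_perm sides _ false
      have hR : Symmetric (fun x y : Int => m < x + y) := fun a b h => by
        simpa [Int.add_comm] using h
      have hpair : (List.Pairwise (fun x y : Int => m < x + y) sides) ↔
          m < ss[0]'h0 + ss[1]'h1 := by
        rw [← List.Perm.pairwise_iff (fun {x y} h => hR h) hperm]
        constructor
        · intro hp
          exact List.pairwise_iff_getElem.mp hp 0 1 h0 h1 (by omega)
        · intro hlt
          refine List.pairwise_iff_getElem.mpr ?_
          intro p q hp hq hpq
          have e0 : ss[0]'h0 ≤ ss[p]'hp :=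
            PySem.List.sorted_id_getElem_mono sides (Nat.zero_le p) hp
          have e1 : ss[1]'h1 ≤ ss[q]'hq :=
            PySem.List.sorted_id_getElem_mono sides (by omega) hq
          omega
      rw [← hpair, List.pairwise_iff_getElem]
      constructor
      · intro hall p q hp hq hpq
        have := hall p q (Nat.zero_le p) hpq hq
        rwa [List.getD_eq_getElem sides 0 hp, List.getD_eq_getElem sides 0 hq] at this
      · intro hall p q _ hpq hq
        have hp : p < sides.length := by omega
        have := hall p q hp hq hpq
        rwa [List.getD_eq_getElem sides 0 hp, List.getD_eq_getElem sides 0 hq]
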